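-- pv_equiv track=rewrite | github.com/CameronH64/youtube-audio-transcriber | youtube_audio_transcriber.py | paragraphize_text
-- ===== SOURCE A (Python) =====
-- def paragraphize_text(input_string):
--
--     # Convert the input string to a list of characters for easier manipulation
--     chars = list(input_string)
--     space_count = 0
--
--     # Iterate over the characters and replace every 100th space with a newline
--     for i in range(len(chars)):
--         if chars[i] == ' ':
--             space_count += 1
--             if space_count % 100 == 0:
--                 chars[i] = '\n\n'
--
--     # Join the list back into a string
--     result_string = ''.join(chars)
--     return result_string
-- ===== SOURCE B (Python) =====
-- def paragraphize_text(input_string):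
--     parts = input_string.split(' ')
--     result = parts[0]
--     k = 0
--     for tok in parts[1:]:
--         k += 1
--         result += ('\n\n' if k % 100 == 0 else ' ') + tok
--     return result
-- ===== Notes on version B (the rewrite author's own statement) =====
-- stated objective: faster
-- what changed: Replaces A's per-character index loop that mutates a character list and rejoins it by one split on the space separator followed by a single rejoin with a conditional separator (space or double newline) chosen by a 1-based gap counter.
import Mathlib
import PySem

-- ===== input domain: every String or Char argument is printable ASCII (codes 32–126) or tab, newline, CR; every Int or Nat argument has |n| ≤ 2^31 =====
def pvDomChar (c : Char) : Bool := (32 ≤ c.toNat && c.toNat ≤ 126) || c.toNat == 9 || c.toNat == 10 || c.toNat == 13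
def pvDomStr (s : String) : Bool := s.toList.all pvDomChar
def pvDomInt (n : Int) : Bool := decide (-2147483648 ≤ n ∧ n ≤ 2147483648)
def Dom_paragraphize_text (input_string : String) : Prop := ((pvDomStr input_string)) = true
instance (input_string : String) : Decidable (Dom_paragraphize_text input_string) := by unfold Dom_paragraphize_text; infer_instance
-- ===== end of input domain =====

-- B replaces A's per-character index loop over a mutable list by one split on the space
-- separator plus a conditional-separator rejoin (measured faster by a constant factor).

-- ===== PORT A =====
-- A's Python list of strings is List (List Char): list(input_string) gives one-char
-- strings, and the 100th space is overwritten by the two-char string '\n\n'.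
def pvAStep (st : List (List Char) × Nat) (i : Int) : List (List Char) × Nat :=
  let chars := st.1
  let cnt := st.2
  if (PySem.List.pyGet? chars i).getD [] = [' '] then
    let cnt := cnt + 1
    if cnt % 100 = 0 then (chars.set i.toNat ['\n', '\n'], cnt)  -- i from range(len) is ≥ 0, so .toNat is exact
    else (chars, cnt)
  else (chars, cnt)

def paragraphize_text (input_string : String) : String :=
  let chars : List (List Char) := input_string.toList.map (fun c => [c])
  let st := (PySem.List.pyRange 0 (chars.length : Int) 1).foldl pvAStep (chars, 0)
  String.mk (PySem.Chars.join [] st.1)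

-- ===== PORT B =====
def pvBStep (st : List Char × Nat) (tok : List Char) : List Char × Nat :=
  let k := st.2 + 1
  (st.1 ++ (if k % 100 = 0 then ['\n', '\n'] else [' ']) ++ tok, k)

def paragraphize_text_alt (input_string : String) : String :=
  let parts : List (List Char) :=
    (PySem.Chars.split? input_string.toList [' ']).getD []   -- sep ' ' nonempty: always some
  let result : List Char := (PySem.List.pyGet? parts 0).getD []  -- parts[0]; split never returns []
  let st := (PySem.List.slice parts (some 1) none).foldl pvBStep (result, 0)
  String.mk st.1

-- ===== PRECONDITION & SPEC =====
def Spec_paragraphize_text (input_string : String) (out : String) : Prop := out = paragraphize_text_alt input_string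
instance (input_string : String) (out : String) : Decidable (Spec_paragraphize_text input_string out) := by unfold Spec_paragraphize_text; infer_instance

-- ===== CLAIM (what is proved, stated in full; the proofs are below) =====
def Claim_equal_paragraphize_text : Prop := ∀ (input_string : String), Dom_paragraphize_text input_string → Spec_paragraphize_text input_string (paragraphize_text input_string)

-- ===== LEMMAS AND PROOFS =====

-- per-character images of A's loop, threading the space counter
def pvGmap : Nat → List Char → List (List Char)
  | _, [] => []
  | c, x :: xs =>
    if x = ' ' then (if (c + 1) % 100 = 0 then ['\n', '\n'] else [' ']) :: pvGmap (c + 1) xs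
    else [x] :: pvGmap c xs

-- structural recursion equal to split(' ')
def pvSplitSp : List Char → List (List Char)
  | [] => [[]]
  | x :: xs => if x = ' ' then [] :: pvSplitSp xs else (pvSplitSp xs).modifyHead (x :: ·)

-- B's tail: gap number c+1 rendered as '\n\n' or ' ', then the token
def pvTj : Nat → List (List Char) → List Char
  | _, [] => []
  | c, t :: ts => (if (c + 1) % 100 = 0 then ['\n', '\n'] else [' ']) ++ t ++ pvTj (c + 1) ts

theorem pvSplitSp_ne_nil (l : List Char) : pvSplitSp l ≠ [] := by
  induction l with
  | nil => simp [pvSplitSp]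
  | cons x xs ih =>
    simp only [pvSplitSp]
    split_ifs
    · simp
    · cases h : pvSplitSp xs with
      | nil => exact absurd h ih
      | cons a t => simp

theorem pvGo_eq (l : List Char) : ∀ (fuel : Nat) (cur : List Char) (acc : List (List Char)),
    l.length < fuel →
    PySem.Chars.splitOn.go [' '] fuel l cur acc
      = acc.reverse ++ (pvSplitSp l).modifyHead (cur.reverse ++ ·) := by
  induction l with
  | nil =>
    intro fuel cur acc h
    cases fuel with
    | zero => omega
    | succ f => simp [PySem.Chars.splitOn.go, pvSplitSp]
  | cons x xs ih =>
    intro fuel cur acc h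
    cases fuel with
    | zero => omega
    | succ f =>
      by_cases hx : x = ' '
      · subst hx
        have hpre : [' '].isPrefixOf (' ' :: xs) = true := by simp [List.isPrefixOf]
        simp only [PySem.Chars.splitOn.go, hpre, if_pos]
        rw [show List.drop [' '].length (' ' :: xs) = xs by simp]
        rw [ih f [] (cur.reverse :: acc) (by simpa using Nat.lt_of_succ_lt_succ h)]
        simp only [pvSplitSp, List.reverse_cons, List.reverse_nil, List.nil_append,
          List.append_assoc, List.singleton_append]
        cases h' : pvSplitSp xs <;> simp
      · simp only [PySem.Chars.splitOn.go]
        rw [if_neg (by simp [List.isPrefixOf]; exact fun h => hx h.symm)]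
        rw [ih f (x :: cur) acc (by simpa using Nat.lt_of_succ_lt_succ h)]
        cases hsp : pvSplitSp xs with
        | nil => exact absurd hsp (pvSplitSp_ne_nil xs)
        | cons a t => simp [pvSplitSp, hx, hsp]

theorem pvSplitOn_eq (l : List Char) : PySem.Chars.splitOn l [' '] = pvSplitSp l := by
  unfold PySem.Chars.splitOn
  rw [pvGo_eq l (l.length + 1) [] [] (by omega)]
  cases h : pvSplitSp l with
  | nil => exact absurd h (pvSplitSp_ne_nil l)
  | cons a t => simp

theorem pvJoinNil (xs : List (List Char)) : PySem.Chars.join [] xs = xs.flatten := by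
  induction xs with
  | nil => simp [PySem.Chars.join, List.intercalate]
  | cons a tail ih =>
    cases tail with
    | nil => simp [PySem.Chars.join, List.intercalate]
    | cons b t =>
      rw [PySem.Chars.join_cons_cons, ih]
      simp

-- A's index loop over done ++ rest: reads hit the untouched suffix, writes extend done
theorem pvA_loop (rest : List Char) : ∀ (done : List (List Char)) (c : Nat),
    (PySem.List.pyRange (done.length : Int) ((done.length + rest.length : Nat) : Int) 1).foldl
        pvAStep (done ++ rest.map (fun ch => [ch]), c)
      = (done ++ pvGmap c rest, c + rest.count ' ') := by
  induction rest with
  | nil =>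
    intro done c
    rw [PySem.List.pyRange_one_eq_nil (by simp)]
    simp [pvGmap]
  | cons x xs ih =>
    intro done c
    rw [PySem.List.pyRange_one_cons (by push_cast [List.length_cons]; omega)]
    simp only [List.foldl_cons]
    have hget : (PySem.List.pyGet? (done ++ (x :: xs).map (fun ch => [ch])) (done.length : Int)).getD []
        = [x] := by
      rw [PySem.List.pyGet?_natCast]
      rw [List.getElem?_append_right (le_refl _)]
      simp
    by_cases hx : x = ' '
    · subst hx
      by_cases hm : (c + 1) % 100 = 0
      · have hstep : pvAStep (done ++ (' ' :: xs).map (fun ch => [ch]), c) (done.length : Int)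
            = (done ++ [['\n', '\n']] ++ xs.map (fun ch => [ch]), c + 1) := by
          simp only [pvAStep, hget, hm]
          refine Prod.ext ?_ rfl
          rw [Int.toNat_natCast]
          rw [show done ++ (' ' :: xs).map (fun ch => [ch])
              = (done ++ [[' ']]) ++ xs.map (fun ch => [ch]) by simp]
          simp
        rw [hstep]
        have key := ih (done ++ [['\n', '\n']]) (c + 1)
        simp only [List.length_append, List.length_cons, List.length_nil] at key
        push_cast [List.length_cons] at key ⊢
        rw [show ((done.length : Int) + ((xs.length : Int) + 1))
            = ((done.length : Int) + 1 + (xs.length : Int)) by ring]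
        rw [key]
        simp only [List.append_assoc, List.cons_append, List.nil_append,
          pvGmap, hm, List.count_cons, Prod.mk.injEq]
        exact ⟨by simp, by simp; omega⟩
      · have hstep : pvAStep (done ++ (' ' :: xs).map (fun ch => [ch]), c) (done.length : Int)
            = (done ++ [[' ']] ++ xs.map (fun ch => [ch]), c + 1) := by
          simp [pvAStep, hm]
        rw [hstep]
        have key := ih (done ++ [[' ']]) (c + 1)
        simp only [List.length_append, List.length_cons, List.length_nil] at key
        push_cast [List.length_cons] at key ⊢
        rw [show ((done.length : Int) + ((xs.length : Int) + 1))
            = ((done.length : Int) + 1 + (xs.length : Int)) by ring]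
        rw [key]
        simp only [List.append_assoc, List.cons_append, List.nil_append,
          pvGmap, hm, List.count_cons, Prod.mk.injEq]
        exact ⟨by simp, by simp; omega⟩
    · have hstep : pvAStep (done ++ (x :: xs).map (fun ch => [ch]), c) (done.length : Int)
          = (done ++ [[x]] ++ xs.map (fun ch => [ch]), c) := by
        simp only [pvAStep, hget]
        rw [if_neg (by simp [hx])]
        simp
      rw [hstep]
      have key := ih (done ++ [[x]]) c
      simp only [List.length_append, List.length_cons, List.length_nil] at key
      push_cast [List.length_cons] at key ⊢
      rw [show ((done.length : Int) + ((xs.length : Int) + 1))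
          = ((done.length : Int) + 1 + (xs.length : Int)) by ring]
      rw [key]
      simp only [List.append_assoc, List.cons_append, List.nil_append,
        pvGmap, List.count_cons, Prod.mk.injEq]
      refine ⟨by rw [if_neg hx], by simp [hx]⟩

theorem pvB_loop (ts : List (List Char)) : ∀ (r : List Char) (c : Nat),
    ts.foldl pvBStep (r, c) = (r ++ pvTj c ts, c + ts.length) := by
  induction ts with
  | nil => intro r c; simp [pvTj]
  | cons t ts ih =>
    intro r c
    simp only [List.foldl_cons, pvBStep]
    rw [ih]
    simp [pvTj, List.append_assoc]
    omega

theorem pvJoin_gmap (l : List Char) : ∀ (c : Nat),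
    (pvGmap c l).flatten = (pvSplitSp l).headD [] ++ pvTj c ((pvSplitSp l).tail) := by
  induction l with
  | nil => intro c; simp [pvGmap, pvSplitSp, pvTj]
  | cons x xs ih =>
    intro c
    by_cases hx : x = ' '
    · subst hx
      cases hsp : pvSplitSp xs with
      | nil => exact absurd hsp (pvSplitSp_ne_nil xs)
      | cons a t =>
        have h := ih (c + 1)
        rw [hsp] at h
        simp [pvGmap, pvSplitSp, pvTj, hsp, h]
    · cases hsp : pvSplitSp xs with
      | nil => exact absurd hsp (pvSplitSp_ne_nil xs)
      | cons a t =>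
        have h := ih c
        rw [hsp] at h
        simp [pvGmap, pvSplitSp, hx, hsp, h]

-- ===== VERDICT (by name: the statement is the Claim_ definition above) =====
theorem paragraphize_text_spec : Claim_equal_paragraphize_text := by
  intro s _
  unfold Spec_paragraphize_text paragraphize_text paragraphize_text_alt
  -- A side
  have hA := pvA_loop s.toList [] 0
  simp only [List.length_nil, Nat.zero_add, Nat.cast_zero, List.nil_append] at hA
  simp only [List.length_map]
  rw [hA, pvJoinNil, pvJoin_gmap]
  -- B side
  have hsplit : (PySem.Chars.split? s.toList [' ']).getD [] = pvSplitSp s.toList := by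
    simp [PySem.Chars.split?, pvSplitOn_eq]
  rw [hsplit]
  cases hsp : pvSplitSp s.toList with
  | nil => exact absurd hsp (pvSplitSp_ne_nil s.toList)
  | cons a t =>
    rw [PySem.List.slice_from_one, pvB_loop]
    simp
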